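-- pv_equiv track=rewrite | github.com/omerlavie/ROS-MSTC | src/coverage_node.py | convert_grid_size
-- ===== SOURCE A (Python) =====
-- import math
--
-- def pp(x):
--     # The function immetate ++ functionality.
--     return x + 1
--
-- def convert_grid_size(block_size, old_grid):
--     # Convert the size of the grid by block_size.
--     num_of_cols = int(math.trunc(len(old_grid[0]) / block_size))
--     num_of_rows = int(math.trunc(len(old_grid) / block_size))
--
--     cols_grid = make_empty_grid(len(old_grid), num_of_cols, False)
--     resized_grid = make_empty_grid(num_of_rows, num_of_cols, False)
--
--     i = 0
--     for k in range(len(old_grid)):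
--         occupied = False
--         j = 0
--         for l in range(len(old_grid[0])):
--             if old_grid[k][l]:
--                 occupied = True
--             if (l % block_size) + 1 == block_size:
--                 cols_grid[i][j] = occupied
--                 occupied = False
--                 j = pp(j)
--         i = pp(i)
--
--     j = 0
--     for l in range(len(cols_grid[0])):
--         i = 0
--         occupied = False
--         for k in range(len(cols_grid)):
--             if cols_grid[k][l]:
--                 occupied = True
--             if (k % block_size) + 1 == block_size:
--                 resized_grid[i][j] = occupied
--                 occupied = False
--                 i = pp(i)
--         j = pp(j)
--     return resized_grid
--
-- def make_empty_grid(row, col, val):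
--     # Create an empty 2D grid.
--     empty_grid = []
--     for i in range(row):
--         r = []
--         for j in range(col):
--             r.append(val)
--         empty_grid.append(r)
--     return empty_grid
-- ===== SOURCE B (Python) =====
-- import math
--
-- def convert_grid_size(block_size, old_grid):
--     # Convert the size of the grid by block_size: one direct pass over output blocks.
--     num_of_cols = int(math.trunc(len(old_grid[0]) / block_size))
--     num_of_rows = int(math.trunc(len(old_grid) / block_size))
--     return [[any(old_grid[i * block_size + di][j * block_size + dj]
--                  for di in range(block_size) for dj in range(block_size))
--              for j in range(num_of_cols)]
--             for i in range(num_of_rows)]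
-- ===== Notes on version B (the rewrite author's own statement) =====
-- stated objective: simpler
-- what changed: B drops A's intermediate cols_grid and two-stage modulo-triggered reshape entirely, building the result in one nested comprehension over output cells that ORs each block_size x block_size block with any().
import Mathlib
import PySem

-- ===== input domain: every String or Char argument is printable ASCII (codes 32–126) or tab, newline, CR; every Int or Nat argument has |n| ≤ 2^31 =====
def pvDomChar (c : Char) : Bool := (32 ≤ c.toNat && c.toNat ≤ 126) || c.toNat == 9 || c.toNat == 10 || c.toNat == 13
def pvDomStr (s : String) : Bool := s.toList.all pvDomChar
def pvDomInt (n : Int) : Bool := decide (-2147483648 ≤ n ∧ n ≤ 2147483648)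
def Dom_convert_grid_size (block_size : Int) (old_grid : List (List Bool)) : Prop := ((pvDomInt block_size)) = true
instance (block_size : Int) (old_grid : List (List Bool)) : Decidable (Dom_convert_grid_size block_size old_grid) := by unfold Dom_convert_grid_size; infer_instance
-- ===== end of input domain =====

-- B replaces A's two-stage reshape through the intermediate cols_grid by one direct pass
-- over output blocks, OR-ing each block_size×block_size block (objective: simpler).

-- ===== PORT A =====
-- g[k][l]; the .getD defaults fire exactly where Python raises IndexError (excluded by Pre_)
def cellGet (g : List (List Bool)) (k l : Int) : Bool :=
  (PySem.List.pyGet? ((PySem.List.pyGet? g k).getD []) l).getD false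

-- g[i][j] = v (writes in A are always in range on inputs satisfying Pre_)
def setCell (g : List (List Bool)) (i j : Int) (v : Bool) : List (List Bool) :=
  PySem.List.pySetD g i (PySem.List.pySetD ((PySem.List.pyGet? g i).getD []) j v)

-- the loop body BOTH of A's inner loops share verbatim:
-- 'if read(l): occupied = True'; 'if (l % block_size) + 1 == block_size: write, occupied = False, counter += 1'
def pvStep (bs : Int) (r : Int → Bool) (w : List (List Bool) → Int → Bool → List (List Bool))
    (st : List (List Bool) × Bool × Int) (l : Int) : List (List Bool) × Bool × Int :=
  let occupied := if r l then true else st.2.1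
  if PySem.Int.mod l bs + 1 = bs then (w st.1 st.2.2 occupied, false, st.2.2 + 1)
  else (st.1, occupied, st.2.2)

def make_empty_grid (row col : Int) (val : Bool) : List (List Bool) :=
  (PySem.List.pyRange 0 row 1).foldl
    (fun eg _ => eg ++ [(PySem.List.pyRange 0 col 1).foldl (fun r _ => r ++ [val]) []]) []

-- body of A's first outer loop (k over rows; st = (cols_grid, i))
def pvRowLoop (bs : Int) (g : List (List Bool)) (ncols_src : Int)
    (st : List (List Bool) × Int) (k : Int) : List (List Bool) × Int :=
  let inner := (PySem.List.pyRange 0 ncols_src 1).foldl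
    (pvStep bs (fun l => cellGet g k l) (fun cg j v => setCell cg st.2 j v)) (st.1, false, 0)
  (inner.1, st.2 + 1)

-- body of A's second outer loop (l over columns of cols_grid; st = (resized_grid, j))
def pvColLoop (bs : Int) (cg : List (List Bool))
    (st : List (List Bool) × Int) (l : Int) : List (List Bool) × Int :=
  let inner := (PySem.List.pyRange 0 (PySem.List.len cg) 1).foldl
    (pvStep bs (fun k => cellGet cg k l) (fun rg i v => setCell rg i st.2 v)) (st.1, false, 0)
  (inner.1, st.2 + 1)

def convert_grid_size (block_size : Int) (old_grid : List (List Bool)) : List (List Bool) :=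
  let row0 := (PySem.List.pyGet? old_grid 0).getD []          -- old_grid[0]
  let num_of_cols := PySem.Int.truncdiv (PySem.List.len row0) block_size
  let num_of_rows := PySem.Int.truncdiv (PySem.List.len old_grid) block_size
  let cols_grid := make_empty_grid (PySem.List.len old_grid) num_of_cols false
  let resized_grid := make_empty_grid num_of_rows num_of_cols false
  let st1 := (PySem.List.pyRange 0 (PySem.List.len old_grid) 1).foldl
    (pvRowLoop block_size old_grid (PySem.List.len row0)) (cols_grid, 0)
  let cols_grid2 := st1.1
  let st2 := (PySem.List.pyRange 0 (PySem.List.len ((PySem.List.pyGet? cols_grid2 0).getD [])) 1).foldl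
    (pvColLoop block_size cols_grid2) (resized_grid, 0)
  st2.1

-- ===== PORT B =====
def convert_grid_size_alt (block_size : Int) (old_grid : List (List Bool)) : List (List Bool) :=
  let num_of_cols := PySem.Int.truncdiv (PySem.List.len ((PySem.List.pyGet? old_grid 0).getD [])) block_size
  let num_of_rows := PySem.Int.truncdiv (PySem.List.len old_grid) block_size
  (PySem.List.pyRange 0 num_of_rows 1).map (fun i =>
    (PySem.List.pyRange 0 num_of_cols 1).map (fun j =>
      (PySem.List.pyRange 0 block_size 1).any (fun di =>
        (PySem.List.pyRange 0 block_size 1).any (fun dj =>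
          cellGet old_grid (i * block_size + di) (j * block_size + dj)))))

-- ===== PRECONDITION & SPEC =====
-- Exactly the inputs on which A returns: block_size ≠ 0 (else ZeroDivisionError), a nonempty
-- grid (else old_grid[0] is an IndexError) and no row shorter than row 0 (else old_grid[k][l]
-- is an IndexError in the first loop).
def Pre_convert_grid_size (block_size : Int) (old_grid : List (List Bool)) : Prop :=
  block_size ≠ 0 ∧ old_grid ≠ [] ∧ ∀ row ∈ old_grid, (old_grid.headD []).length ≤ row.length
instance (block_size : Int) (old_grid : List (List Bool)) : Decidable (Pre_convert_grid_size block_size old_grid) := by unfold Pre_convert_grid_size; infer_instance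

def pvWitness_convert_grid_size : Int × List (List Bool) :=
  (2, [[true, false, false, true], [false, false, false, false], [false, false, true, false]])

def Spec_convert_grid_size (block_size : Int) (old_grid : List (List Bool)) (out : List (List Bool)) : Prop := out = convert_grid_size_alt block_size old_grid
instance (block_size : Int) (old_grid : List (List Bool)) (out : List (List Bool)) : Decidable (Spec_convert_grid_size block_size old_grid out) := by unfold Spec_convert_grid_size; infer_instance

-- ===== CLAIM (what is proved, stated in full; the proofs are below) =====
def Claim_equal_convert_grid_size : Prop := ∀ (block_size : Int) (old_grid : List (List Bool)), Dom_convert_grid_size block_size old_grid → Pre_convert_grid_size block_size old_grid → Spec_convert_grid_size block_size old_grid (convert_grid_size block_size old_grid)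

-- ===== LEMMAS AND PROOFS =====

-- G[k][j] read through Option, the proof-side view of a grid cell
def gget (G : List (List Bool)) (k j : Nat) : Bool := ((G[k]?.getD [])[j]?.getD false)

-- the sequence of writes A's modulo-trigger performs: at counter q it writes blk q
def writes (w : List (List Bool) → Int → Bool → List (List Bool)) (blk : Nat → Bool)
    (G : List (List Bool)) : Nat → List (List Bool)
  | 0 => G
  | q + 1 => w (writes w blk G q) (q : Int) (blk q)

-- OR of one length-B block of reads starting at q*B
def blkAny (r : Int → Bool) (B q : Nat) : Bool :=
  (List.range B).any (fun t => r ((q * B + t : Nat) : Int))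

lemma cellGet_natCast (G : List (List Bool)) (k l : Nat) :
    cellGet G (k : Int) (l : Int) = gget G k l := by
  simp [cellGet, gget, PySem.List.pyGet?_natCast]

lemma setCell_eq (G : List (List Bool)) (i j : Nat) (v : Bool) :
    setCell G (i : Int) (j : Int) v = G.set i ((G[i]?.getD []).set j v) := by
  simp [setCell, PySem.List.pyGet?_natCast, PySem.List.pySetD_natCast]

lemma length_setCell (G : List (List Bool)) (i j : Nat) (v : Bool) :
    (setCell G (i : Int) (j : Int) v).length = G.length := by
  rw [setCell_eq]; exact List.length_set

lemma rowlen_setCell (G : List (List Bool)) (i j : Nat) (v : Bool) (k : Nat) :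
    ((setCell G (i : Int) (j : Int) v)[k]?.getD []).length = (G[k]?.getD []).length := by
  rw [setCell_eq, List.getElem?_set]
  split_ifs with h1 h2
  · subst h1; simp [List.getElem?_eq_getElem h2]
  · subst h1; rw [List.getElem?_eq_none_iff.mpr (by omega)]
  · rfl

lemma gget_setCell (G : List (List Bool)) (i j : Nat) (v : Bool) (k l : Nat) :
    gget (setCell G (i : Int) (j : Int) v) k l =
      if k = i ∧ l = j ∧ j < (G[i]?.getD []).length ∧ i < G.length then v
      else gget G k l := by
  unfold gget
  rw [setCell_eq, List.getElem?_set]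
  by_cases hik : i = k
  · subst hik
    rw [if_pos rfl]
    by_cases hlen : i < G.length
    · rw [if_pos hlen, Option.getD_some, List.getElem?_set]
      split_ifs with h1 h2 h3 h3 <;> simp_all [List.getElem?_eq_getElem hlen] <;> omega
    · rw [if_neg hlen]
      have hnone : G[i]? = none := List.getElem?_eq_none_iff.mpr (by omega)
      rw [if_neg (by tauto), hnone]
  · rw [if_neg hik, if_neg (fun h => hik h.1.symm)]

-- ===== the master loop lemma: one pass of A's shared loop body =====
lemma pv_master (B : Nat) (hpos : 0 < B) (r : Int → Bool)
    (w : List (List Bool) → Int → Bool → List (List Bool)) (G : List (List Bool)) (n : Nat) :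
    (PySem.List.pyRange 0 (n : Int) 1).foldl (pvStep (B : Int) r w) (G, false, 0) =
      (writes w (blkAny r B) G (n / B),
       (List.range (n % B)).any (fun t => r ((n / B * B + t : Nat) : Int)),
       ((n / B : Nat) : Int)) := by
  induction n with
  | zero =>
    rw [PySem.List.pyRange_one_eq_nil (by norm_num)]
    simp [writes, Nat.zero_div, Nat.zero_mod]
  | succ n ih =>
    have hc : ((n + 1 : Nat) : Int) = (n : Int) + 1 := by push_cast; ring
    rw [hc, PySem.List.pyRange_one_succ_right (by positivity), List.foldl_append, ih]
    have key : n / B * B + n % B = n := Nat.div_add_mod' n B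
    have hlt : n % B < B := Nat.mod_lt _ hpos
    simp only [List.foldl_cons, List.foldl_nil, pvStep]
    rw [PySem.Int.mod_natCast]
    by_cases h : n % B + 1 = B
    · have hcond : ((n % B : Nat) : Int) + 1 = (B : Int) := by exact_mod_cast congrArg (Nat.cast (R := Int)) h
      rw [if_pos hcond]
      have hd1 : (n + 1) / B = n / B + 1 := by
        have hn1 : n + 1 = B * (n / B + 1) := by
          have h1 : B * (n / B) = n / B * B := Nat.mul_comm _ _
          have h2 : B * (n / B + 1) = B * (n / B) + B := by ring
          omega
        rw [hn1, Nat.mul_div_cancel_left _ hpos]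
      have hm1 : (n + 1) % B = 0 := by
        have hn1 : n + 1 = B * (n / B + 1) := by
          have h1 : B * (n / B) = n / B * B := Nat.mul_comm _ _
          have h2 : B * (n / B + 1) = B * (n / B) + B := by ring
          omega
        rw [hn1, Nat.mul_mod_right]
      rw [hd1, hm1]
      have hocc : (if r (n : Int) then true
            else (List.range (n % B)).any (fun t => r ((n / B * B + t : Nat) : Int)))
          = blkAny r B (n / B) := by
        unfold blkAny
        have hrB : List.range (n % B + 1) = List.range (n % B) ++ [n % B] := List.range_succ
        rw [h] at hrB
        have hn : ((n / B * B + n % B : Nat) : Int) = (n : Int) := by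
          exact_mod_cast congrArg (Nat.cast (R := Int)) key
        rw [hrB, List.any_append]
        simp only [List.any_cons, List.any_nil, hn]
        cases r (n : Int) <;> simp
      rw [hocc]
      refine Prod.ext rfl (Prod.ext ?_ ?_)
      · simp
      · push_cast; ring
    · have hcond : ¬ (((n % B : Nat) : Int) + 1 = (B : Int)) := by
        intro hx; exact h (by exact_mod_cast hx)
      rw [if_neg hcond]
      have hsmall : n % B + 1 < B := by omega
      have huniq := (Nat.div_mod_unique (a := n + 1) (d := n / B) (c := n % B + 1) hpos).mpr
        (by constructor
            · have : B * (n / B) = n / B * B := Nat.mul_comm _ _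
              omega
            · exact hsmall)
      rw [huniq.1, huniq.2]
      have : ((n / B * B + n % B : Nat) : Int) = (n : Int) := by exact_mod_cast congrArg (Nat.cast (R := Int)) key
      rw [List.range_succ, List.any_append]
      simp only [List.any_cons, List.any_nil, this]
      refine Prod.ext rfl (Prod.ext ?_ rfl)
      cases r (n : Int) <;> simp

-- writes along a fixed ROW k0 (A's first stage)
lemma writes_row (k0 : Nat) (blk : Nat → Bool) (G : List (List Bool)) (Q : Nat) :
    (writes (fun cg j v => setCell cg (k0 : Int) j v) blk G Q).length = G.length ∧
    (∀ k : Nat, ((writes (fun cg j v => setCell cg (k0 : Int) j v) blk G Q)[k]?.getD []).length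
        = (G[k]?.getD []).length) ∧
    (∀ k l : Nat, gget (writes (fun cg j v => setCell cg (k0 : Int) j v) blk G Q) k l =
      if k = k0 ∧ l < Q ∧ l < (G[k0]?.getD []).length ∧ k0 < G.length then blk l
      else gget G k l) := by
  induction Q with
  | zero => refine ⟨rfl, fun _ => rfl, fun k l => ?_⟩; simp [writes]
  | succ Q ih =>
    obtain ⟨ihlen, ihrow, ihget⟩ := ih
    refine ⟨?_, fun k => ?_, fun k l => ?_⟩
    · rw [writes, length_setCell, ihlen]
    · rw [writes, rowlen_setCell, ihrow]
    · rw [writes, gget_setCell, ihrow, ihlen, ihget k l]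
      by_cases hc : k = k0 ∧ l < Q + 1 ∧ l < (G[k0]?.getD []).length ∧ k0 < G.length
      · rw [if_pos hc]
        obtain ⟨rfl, hlQ, hlr, hklen⟩ := hc
        by_cases hlq : l = Q
        · subst hlq; rw [if_pos ⟨rfl, rfl, hlr, hklen⟩]
        · rw [if_neg (by tauto), if_pos ⟨rfl, by omega, hlr, hklen⟩]
      · rw [if_neg hc, if_neg (by rintro ⟨rfl, rfl, a, b⟩; exact hc ⟨rfl, by omega, a, b⟩),
          if_neg (by rintro ⟨rfl, hl, a, b⟩; exact hc ⟨rfl, by omega, a, b⟩)]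

-- writes along a fixed COLUMN l0 (A's second stage)
lemma writes_col (l0 : Nat) (blk : Nat → Bool) (G : List (List Bool)) (Q : Nat) :
    (writes (fun rg i v => setCell rg i (l0 : Int) v) blk G Q).length = G.length ∧
    (∀ k : Nat, ((writes (fun rg i v => setCell rg i (l0 : Int) v) blk G Q)[k]?.getD []).length
        = (G[k]?.getD []).length) ∧
    (∀ k l, gget (writes (fun rg i v => setCell rg i (l0 : Int) v) blk G Q) k l =
      if l = l0 ∧ k < Q ∧ l0 < (G[k]?.getD []).length ∧ k < G.length then blk k
      else gget G k l) := by
  induction Q with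
  | zero => refine ⟨rfl, fun _ => rfl, fun k l => ?_⟩; simp [writes]
  | succ Q ih =>
    obtain ⟨ihlen, ihrow, ihget⟩ := ih
    refine ⟨?_, fun k => ?_, fun k l => ?_⟩
    · rw [writes, length_setCell, ihlen]
    · rw [writes, rowlen_setCell, ihrow]
    · rw [writes, gget_setCell, ihrow, ihlen, ihget k l]
      by_cases hc : l = l0 ∧ k < Q + 1 ∧ l0 < (G[k]?.getD []).length ∧ k < G.length
      · rw [if_pos hc]
        obtain ⟨rfl, hkQ, hlr, hklen⟩ := hc
        by_cases hkq : k = Q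
        · subst hkq; rw [if_pos ⟨rfl, rfl, hlr, hklen⟩]
        · rw [if_neg (by tauto), if_pos ⟨rfl, by omega, hlr, hklen⟩]
      · rw [if_neg hc, if_neg (by rintro ⟨rfl, rfl, a, b⟩; exact hc ⟨rfl, by omega, a, b⟩),
          if_neg (by rintro ⟨rfl, hk2, a, b⟩; exact hc ⟨rfl, by omega, a, b⟩)]

-- two grids with the same shape and the same cells are equal
lemma range_getElem? (n i : Nat) : (List.range n)[i]? = if i < n then some i else none := by
  by_cases h : i < n
  · simp [h]
  · rw [List.getElem?_eq_none_iff.mpr (by simpa using h), if_neg h]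

lemma grid_ext (G H : List (List Bool)) (hlen : G.length = H.length)
    (hrow : ∀ k : Nat, (G[k]?.getD []).length = (H[k]?.getD []).length)
    (hcell : ∀ k l : Nat, gget G k l = gget H k l) : G = H := by
  apply List.ext_getElem?
  intro k
  by_cases hk : k < G.length
  · have hk' : k < H.length := hlen ▸ hk
    rw [List.getElem?_eq_getElem hk, List.getElem?_eq_getElem hk']
    have hrowk := hrow k
    rw [List.getElem?_eq_getElem hk, List.getElem?_eq_getElem hk'] at hrowk
    simp only [Option.getD_some] at hrowk
    congr 1
    apply List.ext_getElem?
    intro l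
    by_cases hl : l < G[k].length
    · have hl2 : l < H[k].length := hrowk ▸ hl
      have hc := hcell k l
      unfold gget at hc
      rw [List.getElem?_eq_getElem hk, List.getElem?_eq_getElem hk'] at hc
      simp only [Option.getD_some] at hc
      rw [List.getElem?_eq_getElem hl, List.getElem?_eq_getElem hl2] at hc
      simp only [Option.getD_some] at hc
      rw [List.getElem?_eq_getElem hl, List.getElem?_eq_getElem hl2, hc]
    · rw [List.getElem?_eq_none_iff.mpr (by omega), List.getElem?_eq_none_iff.mpr (by omega)]
  · rw [List.getElem?_eq_none_iff.mpr (by omega), List.getElem?_eq_none_iff.mpr (by omega)]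

-- closed form of make_empty_grid
lemma foldl_append_const {α β : Type} (x : α) : ∀ (l : List β) (acc : List α),
    l.foldl (fun a _ => a ++ [x]) acc = acc ++ List.replicate l.length x
  | [], acc => by simp
  | _ :: t, acc => by
    rw [List.foldl_cons, foldl_append_const x t, List.append_assoc]
    simp [List.replicate_succ]

lemma make_empty_grid_eq (row col : Int) (v : Bool) :
    make_empty_grid row col v = List.replicate row.toNat (List.replicate col.toNat v) := by
  unfold make_empty_grid
  rw [foldl_append_const, foldl_append_const]
  simp [PySem.List.length_pyRange_one]

lemma truncdiv_natCast (m k : Nat) :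
    PySem.Int.truncdiv (m : Int) (k : Int) = ((m / k : Nat) : Int) := by
  show Int.tdiv _ _ = _
  rw [Int.tdiv_eq_ediv] <;> simp

-- stage 1: the first outer loop turns the all-false cols_grid into the per-row block ORs
def ent1 (g : List (List Bool)) (B k j : Nat) : Bool := blkAny (fun l => cellGet g (k : Int) l) B j

def grid1 (g : List (List Bool)) (B C m : Nat) : List (List Bool) :=
  (List.range g.length).map (fun k =>
    if k < m then (List.range C).map (ent1 g B k) else List.replicate C false)

lemma gget_grid1 (g : List (List Bool)) (B C m k l : Nat) :
    gget (grid1 g B C m) k l =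
      if k < g.length ∧ l < C then (if k < m then ent1 g B k l else false) else false := by
  unfold gget grid1
  rw [List.getElem?_map, range_getElem?]
  by_cases hk : k < g.length
  · rw [if_pos hk, Option.map_some, Option.getD_some]
    by_cases hkm : k < m
    · rw [if_pos hkm, List.getElem?_map, range_getElem?]
      by_cases hl : l < C
      · rw [if_pos hl]; simp [hk, hl, hkm]
      · rw [if_neg hl]; simp [hk, hl]
    · rw [if_neg hkm, List.getElem?_replicate]
      by_cases hl : l < C <;> simp [hk, hl, hkm]
  · rw [if_neg hk]; simp [hk]

lemma len_grid1 (g : List (List Bool)) (B C m : Nat) : (grid1 g B C m).length = g.length := by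
  simp [grid1]

lemma rowlen_grid1 (g : List (List Bool)) (B C m k : Nat) :
    ((grid1 g B C m)[k]?.getD []).length = if k < g.length then C else 0 := by
  unfold grid1
  rw [List.getElem?_map, range_getElem?]
  by_cases hk : k < g.length
  · rw [if_pos hk, Option.map_some, Option.getD_some]
    by_cases hkm : k < m <;> simp [hk, hkm]
  · rw [if_neg hk]; simp [hk]

lemma stage1 (g : List (List Bool)) (B : Nat) (hB : 0 < B) (nc : Nat)
    (hnc : nc = (g[0]?.getD []).length) :
    ∀ m, m ≤ g.length →
    (PySem.List.pyRange 0 (m : Int) 1).foldl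
      (pvRowLoop (B : Int) g (nc : Int))
      (List.replicate g.length (List.replicate (nc / B) false), 0)
    = (grid1 g B (nc / B) m, (m : Int)) := by
  intro m
  induction m with
  | zero =>
    intro _
    rw [PySem.List.pyRange_one_eq_nil (by norm_num), List.foldl_nil]
    refine Prod.ext ?_ rfl
    unfold grid1
    simp [List.map_const']
  | succ m ih =>
    intro hm
    have hc : ((m + 1 : Nat) : Int) = (m : Int) + 1 := by push_cast; ring
    rw [hc, PySem.List.pyRange_one_succ_right (by positivity), List.foldl_append, ih (by omega)]
    simp only [List.foldl_cons, List.foldl_nil]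
    unfold pvRowLoop
    simp only
    rw [pv_master B hB]
    refine Prod.ext ?_ (by push_cast; ring)
    simp only
    obtain ⟨wlen, wrow, wget⟩ := writes_row m (blkAny (fun l => cellGet g (m : Int) l) B)
      (grid1 g B (nc / B) m) (nc / B)
    apply grid_ext
    · rw [wlen, len_grid1, len_grid1]
    · intro k
      rw [wrow, rowlen_grid1, rowlen_grid1]
    · intro k l
      rw [wget, rowlen_grid1, len_grid1, gget_grid1, gget_grid1]
      have hmlen : m < g.length := by omega
      by_cases hk : k = m
      · subst hk
        by_cases hl : l < nc / B
        · rw [if_pos ⟨rfl, hl, (show l < (if k < g.length then nc / B else 0) by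
              rw [if_pos hmlen]; exact hl), hmlen⟩,
            if_pos ⟨hmlen, hl⟩, if_pos (by omega : k < k + 1)]
          rfl
        · rw [if_neg (by tauto), if_neg (by tauto), if_neg (by tauto)]
      · rw [if_neg (by tauto)]
        by_cases hkl : k < g.length ∧ l < nc / B
        · rw [if_pos hkl, if_pos hkl]
          by_cases hkm : k < m
          · rw [if_pos hkm, if_pos (by omega)]
          · rw [if_neg hkm, if_neg (by omega)]
        · rw [if_neg hkl, if_neg hkl]

-- stage 2: the second outer loop over a source grid cg of shape R × C
def ent2 (cg : List (List Bool)) (B i j : Nat) : Bool := blkAny (fun k => cellGet cg k (j : Int)) B i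

def grid2 (cg : List (List Bool)) (B QR C m : Nat) : List (List Bool) :=
  (List.range QR).map (fun i =>
    (List.range C).map (fun j => if j < m then ent2 cg B i j else false))

lemma gget_grid2 (cg : List (List Bool)) (B QR C m k l : Nat) :
    gget (grid2 cg B QR C m) k l =
      if k < QR ∧ l < C ∧ l < m then ent2 cg B k l else false := by
  unfold gget grid2
  rw [List.getElem?_map, range_getElem?]
  by_cases hk : k < QR
  · rw [if_pos hk, Option.map_some, Option.getD_some, List.getElem?_map, range_getElem?]
    by_cases hl : l < C
    · rw [if_pos hl, Option.map_some, Option.getD_some]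
      by_cases hlm : l < m <;> simp [hk, hl, hlm]
    · rw [if_neg hl]; simp [hk, hl]
  · rw [if_neg hk]; simp [hk]

lemma len_grid2 (cg : List (List Bool)) (B QR C m : Nat) : (grid2 cg B QR C m).length = QR := by
  simp [grid2]

lemma rowlen_grid2 (cg : List (List Bool)) (B QR C m k : Nat) :
    ((grid2 cg B QR C m)[k]?.getD []).length = if k < QR then C else 0 := by
  unfold grid2
  rw [List.getElem?_map, range_getElem?]
  by_cases hk : k < QR
  · rw [if_pos hk, Option.map_some, Option.getD_some]; simp [hk]
  · rw [if_neg hk]; simp [hk]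

lemma stage2 (cg : List (List Bool)) (B : Nat) (hB : 0 < B) (R : Nat) (hR : cg.length = R)
    (C : Nat) :
    ∀ m, m ≤ C →
    (PySem.List.pyRange 0 (m : Int) 1).foldl
      (pvColLoop (B : Int) cg)
      (List.replicate (R / B) (List.replicate C false), 0)
    = (grid2 cg B (R / B) C m, (m : Int)) := by
  intro m
  induction m with
  | zero =>
    intro _
    rw [PySem.List.pyRange_one_eq_nil (by norm_num), List.foldl_nil]
    refine Prod.ext ?_ rfl
    unfold grid2
    simp [List.map_const']
  | succ m ih =>
    intro hm
    have hc : ((m + 1 : Nat) : Int) = (m : Int) + 1 := by push_cast; ring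
    rw [hc, PySem.List.pyRange_one_succ_right (by positivity), List.foldl_append, ih (by omega)]
    simp only [List.foldl_cons, List.foldl_nil]
    unfold pvColLoop
    simp only [PySem.List.len_eq, hR]
    rw [pv_master B hB]
    refine Prod.ext ?_ (by push_cast; ring)
    simp only
    obtain ⟨wlen, wrow, wget⟩ := writes_col m (blkAny (fun k => cellGet cg k (m : Int)) B)
      (grid2 cg B (R / B) C m) (R / B)
    apply grid_ext
    · rw [wlen, len_grid2, len_grid2]
    · intro k
      rw [wrow, rowlen_grid2, rowlen_grid2]
    · intro k l
      rw [wget, rowlen_grid2, len_grid2, gget_grid2, gget_grid2]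
      by_cases hl : l = m
      · subst hl
        by_cases hk : k < R / B
        · rw [if_pos ⟨rfl, hk, (show l < (if k < R / B then C else 0) by
              rw [if_pos hk]; omega), hk⟩,
            if_pos ⟨hk, by omega, by omega⟩]
          rfl
        · rw [if_neg (by tauto), if_neg (by tauto), if_neg (by tauto)]
      · rw [if_neg (by tauto)]
        by_cases hkl : k < R / B ∧ l < C ∧ l < m
        · rw [if_pos hkl, if_pos ⟨hkl.1, hkl.2.1, by omega⟩]
        · rw [if_neg hkl, if_neg (by rintro ⟨a, b, c⟩; exact hkl ⟨a, b, by omega⟩)]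

-- grids stay empty when the resized grid starts empty (block_size < 0)
lemma pySetD_nil {α : Type} (i : Int) (v : α) : PySem.List.pySetD ([] : List α) i v = [] := by
  have h : PySem.List.pySet? ([] : List α) i v = none := by
    rw [PySem.List.pySet?_eq_none_iff]
    simp [PySem.Raise.InRange]
    try omega
  simp [PySem.List.pySetD, h]

lemma setCell_nil (i j : Int) (v : Bool) : setCell [] i j v = [] := by
  simp [setCell, pySetD_nil]

lemma foldl_pvStep_nil (bs : Int) (r : Int → Bool)
    (w : List (List Bool) → Int → Bool → List (List Bool)) (hw : ∀ i v, w [] i v = []) :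
    ∀ (lst : List Int) (occ : Bool) (j : Int),
      (lst.foldl (pvStep bs r w) ([], occ, j)).1 = []
  | [], _, _ => rfl
  | x :: t, occ, j => by
    rw [List.foldl_cons]
    have hstep : ∃ occ' j', pvStep bs r w ([], occ, j) x = ([], occ', j') := by
      unfold pvStep
      simp only
      by_cases hmod : PySem.Int.mod x bs + 1 = bs
      · rw [if_pos hmod, hw]
        exact ⟨false, j + 1, rfl⟩
      · rw [if_neg hmod]
        exact ⟨_, j, rfl⟩
    obtain ⟨occ', j', hstep⟩ := hstep
    rw [hstep]
    exact foldl_pvStep_nil bs r w hw t occ' j'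

lemma foldl_pvColLoop_nil (bs : Int) (cg : List (List Bool)) :
    ∀ (lst : List Int) (j : Int), (lst.foldl (pvColLoop bs cg) ([], j)).1 = []
  | [], _ => rfl
  | x :: t, j => by
    rw [List.foldl_cons]
    unfold pvColLoop
    simp only
    rw [foldl_pvStep_nil _ _ _ (fun i v => setCell_nil i j v)]
    exact foldl_pvColLoop_nil bs cg t (j + 1)

lemma tdiv_nonpos_of_neg (m : Nat) (b : Int) (hb : b < 0) : PySem.Int.truncdiv (m : Int) b ≤ 0 := by
  show Int.tdiv _ _ ≤ 0
  have h2 : (0 : Int) ≤ (m : Int).tdiv (-b) := Int.tdiv_nonneg (by positivity) (by omega)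
  have h3 := Int.tdiv_neg (m : Int) b
  omega

-- ===== VERDICT (by name: the statement is the Claim_ definition above) =====
theorem convert_grid_size_spec : Claim_equal_convert_grid_size := by
  intro bs g _ ⟨hbs, hne, hrows⟩
  unfold Spec_convert_grid_size convert_grid_size convert_grid_size_alt
  simp only [PySem.List.len_eq]
  rcases lt_trichotomy bs 0 with hneg | hzero | hpos
  · -- block_size < 0: both sides are []
    have hrowsle : PySem.Int.truncdiv (g.length : Int) bs ≤ 0 := tdiv_nonpos_of_neg _ _ hneg
    rw [make_empty_grid_eq (PySem.Int.truncdiv (g.length : Int) bs) _ false]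
    rw [show (PySem.Int.truncdiv (g.length : Int) bs).toNat = 0 by omega]
    simp only [List.replicate_zero]
    rw [foldl_pvColLoop_nil, PySem.List.pyRange_one_eq_nil hrowsle, List.map_nil]
  · exact absurd hzero hbs
  · -- block_size > 0
    obtain ⟨B, rfl⟩ : ∃ B : Nat, bs = (B : Int) := ⟨bs.toNat, by omega⟩
    have hB : 0 < B := by exact_mod_cast hpos
    have hR : 0 < g.length := by cases g <;> simp_all
    set nc := ((PySem.List.pyGet? g 0).getD []).length with hnc
    have hnc' : nc = (g[0]?.getD []).length := by
      rw [hnc, PySem.List.pyGet?_zero]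
    set C := nc / B with hC
    set QR := g.length / B with hQR
    rw [truncdiv_natCast nc B, truncdiv_natCast g.length B]
    rw [make_empty_grid_eq, make_empty_grid_eq]
    simp only [Int.toNat_natCast]
    -- stage 1
    rw [stage1 g B hB nc hnc' g.length (le_refl _)]
    simp only
    -- the head row of the stage-1 result has length C
    have hhead : ((grid1 g B C g.length)[0]?.getD []).length = C := by
      rw [rowlen_grid1]; simp [hR]
    have hheadget : (PySem.List.pyGet? (grid1 g B C g.length) 0).getD [] =
        ((grid1 g B C g.length)[0]?.getD []) := by
      rw [PySem.List.pyGet?_zero]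
    rw [hheadget, hhead]
    -- stage 2
    rw [stage2 (grid1 g B C g.length) B hB g.length (len_grid1 g B C g.length) C C (le_refl _)]
    simp only
    -- both sides as explicit maps
    rw [PySem.List.pyRange_zero_nat QR, List.map_map]
    unfold grid2
    apply List.map_congr_left
    intro i hi
    rw [List.mem_range] at hi
    simp only [Function.comp_apply]
    rw [PySem.List.pyRange_zero_nat C, List.map_map]
    apply List.map_congr_left
    intro j hj
    rw [List.mem_range] at hj
    simp only [Function.comp_apply, hj, if_true]
    -- cell-level equality
    unfold ent2 blkAny
    rw [PySem.List.pyRange_zero_nat B, List.any_map]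
    apply PySem.List.any_congr_mem
    intro t ht
    rw [List.mem_range] at ht
    have hidx : i * B + t < g.length := by
      calc i * B + t < (i + 1) * B := by nlinarith
        _ ≤ QR * B := Nat.mul_le_mul_right _ (by omega)
        _ ≤ g.length := Nat.div_mul_le_self _ _
    have hcast : ((i : Int) * (B : Int) + (t : Int)) = ((i * B + t : Nat) : Int) := by push_cast; ring
    simp only [Function.comp_apply, hcast]
    rw [cellGet_natCast]
    have hg1 : gget (grid1 g B C g.length) (i * B + t) j = ent1 g B (i * B + t) j := by
      rw [gget_grid1]; simp [hidx, hj]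
    rw [hg1]
    unfold ent1 blkAny
    rw [List.any_map]
    apply PySem.List.any_congr_mem
    intro u hu
    rw [List.mem_range] at hu
    simp only [Function.comp_apply]
    have hcast2 : ((j : Int) * (B : Int) + (u : Int)) = ((j * B + u : Nat) : Int) := by push_cast; ring
    rw [hcast2]
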